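-- pv_equiv track=rewrite | github.com/MrTejpalSingh/Data_Structures | Small Practise Programs/Fundamentals Python/Module1/TcketGeneration.py | generate_ticket
-- ===== SOURCE A (Python) =====
-- def generate_ticket(airline, source, destination, no_of_passengers):
--     ticket_number_list = []
--     ticket_number = []
--     if no_of_passengers >= 5:
--         for i in range(0, 5):
--             n = 4
--             while n >= 0:
--                 ticket_number.append((no_of_passengers + 100) - n)
--                 n -= 1
--             ticket_number_list.append(airline + ":" + source[0:3] + ":" + destination[0:3]+":"+str(ticket_number[i]))
--     else:
--         for i in range(0, no_of_passengers):
--             ticket_number_list.append(airline + ":" + source[0:3] + ":" + destination[0:3]+":10"+str(i+1))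
--
--     return ticket_number_list
-- ===== SOURCE B (Python) =====
-- def _tickets(prefix, sep, last, k):
--     """k ticket strings ending in numbers last-k+1 .. last, built recursively back-to-front."""
--     if k <= 0:
--         return []
--     return _tickets(prefix, sep, last - 1, k - 1) + [prefix + sep + str(last)]
--
--
-- def generate_ticket(airline, source, destination, no_of_passengers):
--     prefix = airline + ":" + source[0:3] + ":" + destination[0:3] + ":"
--     if no_of_passengers >= 5:
--         return _tickets(prefix, "", no_of_passengers + 100, 5)
--     return _tickets(prefix, "10", no_of_passengers, no_of_passengers)
-- ===== Notes on version B (the rewrite author's own statement) =====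
-- stated objective: alternative
-- what changed: Replaces A's two imperative append loops (plus the auxiliary 25-element ticket_number table and inner while loop) with one shared recursive helper that builds the ticket list back-to-front from the last ticket number, unifying both branches as calls _tickets(prefix,'',n+100,5) and _tickets(prefix,'10',n,n).
import Mathlib
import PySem

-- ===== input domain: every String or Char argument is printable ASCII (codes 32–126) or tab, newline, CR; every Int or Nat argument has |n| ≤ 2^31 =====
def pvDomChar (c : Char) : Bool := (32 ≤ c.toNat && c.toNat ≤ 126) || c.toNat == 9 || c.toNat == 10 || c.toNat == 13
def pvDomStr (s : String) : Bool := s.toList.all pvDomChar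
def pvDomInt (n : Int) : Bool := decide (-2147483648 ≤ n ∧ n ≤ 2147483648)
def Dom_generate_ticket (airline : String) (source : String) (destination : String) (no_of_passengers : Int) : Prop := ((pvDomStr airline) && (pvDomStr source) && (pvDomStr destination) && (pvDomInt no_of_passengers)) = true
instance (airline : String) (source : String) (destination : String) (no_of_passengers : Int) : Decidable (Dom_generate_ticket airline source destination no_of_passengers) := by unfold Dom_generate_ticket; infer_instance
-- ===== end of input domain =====

-- B replaces A's two append loops and auxiliary ticket_number table with one shared recursive
-- helper building the ticket list back-to-front from the last ticket number (alternative decomposition).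


-- ===== PORT A =====
-- the inner 'while n >= 0' loop; fuel 5 is exactly its iteration count (n = 4,3,2,1,0)
def pvTnWhile (tn : List Int) (p : Int) (n : Int) : Nat → List Int
  | 0 => tn
  | fuel + 1 => if n ≥ 0 then pvTnWhile (tn ++ [(p + 100) - n]) p (n - 1) fuel else tn

def generate_ticket (airline : String) (source : String) (destination : String) (no_of_passengers : Int) : List String :=
  if no_of_passengers ≥ 5 then
    ((PySem.List.pyRange 0 5 1).foldl
      (fun (st : List Int × List String) i =>
        let tn := pvTnWhile st.1 no_of_passengers 4 5
        (tn, st.2 ++ [airline ++ ":" ++ PySem.Str.slice source (some 0) (some 3) ++ ":" ++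
                      PySem.Str.slice destination (some 0) (some 3) ++ ":" ++
                      -- ticket_number[i]: i is always in range (tn has ≥ 5 elements), so getD 0 never fires
                      PySem.Int.toStr ((PySem.List.pyGet? tn i).getD 0)]))
      ([], [])).2
  else
    (PySem.List.pyRange 0 no_of_passengers 1).foldl
      (fun acc i =>
        acc ++ [airline ++ ":" ++ PySem.Str.slice source (some 0) (some 3) ++ ":" ++
                PySem.Str.slice destination (some 0) (some 3) ++ ":10" ++ PySem.Int.toStr (i + 1)])
      []

-- ===== PORT B =====
-- recursive helper: k ticket strings ending in numbers last-k+1 .. last, built back-to-front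
def pvTickets (pref sep : String) (last : Int) (k : Int) : List String :=
  if _h : k ≤ 0 then []
  else pvTickets pref sep (last - 1) (k - 1) ++ [pref ++ sep ++ PySem.Int.toStr last]
termination_by k.toNat
decreasing_by omega

def generate_ticket_alt (airline : String) (source : String) (destination : String) (no_of_passengers : Int) : List String :=
  let pref := airline ++ ":" ++ PySem.Str.slice source (some 0) (some 3) ++ ":" ++
                PySem.Str.slice destination (some 0) (some 3) ++ ":"
  if no_of_passengers ≥ 5 then
    pvTickets pref "" (no_of_passengers + 100) 5
  else
    pvTickets pref "10" no_of_passengers no_of_passengers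

-- ===== PRECONDITION & SPEC =====
def Spec_generate_ticket (airline : String) (source : String) (destination : String) (no_of_passengers : Int) (out : List String) : Prop := out = generate_ticket_alt airline source destination no_of_passengers
instance (airline : String) (source : String) (destination : String) (no_of_passengers : Int) (out : List String) : Decidable (Spec_generate_ticket airline source destination no_of_passengers out) := by unfold Spec_generate_ticket; infer_instance

-- ===== CLAIM (what is proved, stated in full; the proofs are below) =====
def Claim_equal_generate_ticket : Prop := ∀ (airline : String) (source : String) (destination : String) (no_of_passengers : Int), Dom_generate_ticket airline source destination no_of_passengers → Spec_generate_ticket airline source destination no_of_passengers (generate_ticket airline source destination no_of_passengers)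

-- ===== LEMMAS AND PROOFS =====

-- characterisation of the recursive helper as a map over a range (Nat count)
theorem pvTickets_eq_map (pref sep : String) (k : Nat) : ∀ (last : Int),
    pvTickets pref sep last (k : Int) =
      (List.range k).map (fun j : Nat => pref ++ sep ++ PySem.Int.toStr (last - k + 1 + (j : Int))) := by
  induction k with
  | zero => intro last; rw [pvTickets]; simp
  | succ k ih =>
    intro last
    rw [pvTickets]
    have hk : ¬ ((k + 1 : Int) ≤ 0) := by omega
    simp only [Int.natCast_succ] at *
    rw [dif_neg hk]
    have h1 : ((k : Int) + 1 - 1) = (k : Int) := by ring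
    rw [h1, ih (last - 1), List.range_succ, List.map_append]
    congr 1
    · exact List.map_congr_left (fun j _ => by congr 2; ring)
    · have h2 : (last - ((k : Int) + 1) + 1 + (k : Int)) = last := by ring
      simp only [List.map_cons, List.map_nil, h2]

theorem pvTickets_neg (pref sep : String) (last k : Int) (h : k ≤ 0) :
    pvTickets pref sep last k = [] := by rw [pvTickets]; simp [h]

theorem generate_ticket_eq_alt (airline source destination : String) (p : Int) :
    generate_ticket airline source destination p = generate_ticket_alt airline source destination p := by
  unfold generate_ticket generate_ticket_alt
  by_cases h : p ≥ 5
  · simp only [h, if_pos]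
    have h5 := pvTickets_eq_map (airline ++ ":" ++ PySem.Str.slice source (some 0) (some 3) ++ ":" ++
        PySem.Str.slice destination (some 0) (some 3) ++ ":") "" 5 (p + 100)
    norm_num at h5
    rw [show PySem.List.pyRange 0 5 1 = [0, 1, 2, 3, 4] by decide]
    simp only [List.foldl]
    rw [h5, show (List.range 5) = [0,1,2,3,4] by decide]
    simp [pvTnWhile, PySem.List.pyGet?, PySem.List.pyIdx?, String.append_assoc]
    refine ⟨?_, ?_, ?_, ?_, ?_⟩ <;> (congr 1; ring)
  · simp only [h, if_false]
    rw [PySem.List.foldl_append_singleton_eq_map]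
    simp only [List.nil_append]
    by_cases hp : p ≤ 0
    · rw [pvTickets_neg _ _ _ _ hp, PySem.List.pyRange_one_eq_nil (by omega)]
      simp
    · have hpn : ((p.toNat : Nat) : Int) = p := by omega
      rw [← hpn, pvTickets_eq_map, PySem.List.pyRange_one, List.map_map]
      refine List.map_congr_left (fun j hj => ?_)
      have h3 : ((p.toNat : Int) - (p.toNat : Int) + 1 + (j : Int)) = ((0 : Int) + (j : Int)) + 1 := by ring
      rw [h3]
      rw [show ((":10" : String) = ":" ++ "10") from rfl]
      simp [String.append_assoc]

-- ===== VERDICT (by name: the statement is the Claim_ definition above) =====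
theorem generate_ticket_spec : Claim_equal_generate_ticket := by
  intro airline source destination p _
  exact generate_ticket_eq_alt airline source destination p
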